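-- pv_equiv track=rewrite | github.com/davvid/git-cola-debian | cola/utils.py | add_parents
-- ===== SOURCE A (Python) =====
-- def add_parents(path_entry_set):
--     """Iterate over each item in the set and add its parent directories."""
--     for path in list(path_entry_set):
--         while '//' in path:
--             path = path.replace('//', '/')
--         if path not in path_entry_set:
--             path_entry_set.add(path)
--         if '/' in path:
--             parent_dir = dirname(path)
--             while parent_dir and parent_dir not in path_entry_set:
--                 path_entry_set.add(parent_dir)
--                 parent_dir = dirname(parent_dir)
--     return path_entry_set
--
-- def dirname(path):
--     """
--     An os.path.dirname() implementation that always uses '/'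
--
--     Avoid os.path.dirname because git's output always
--     uses '/' regardless of platform.
--
--     """
--     while '//' in path:
--         path = path.replace('//', '/')
--     path_dirname = path.rsplit('/', 1)[0]
--     if path_dirname == path:
--         return ''
--     return path.rsplit('/', 1)[0]
-- ===== SOURCE B (Python) =====
-- def add_parents(path_entry_set):
--     """Iterate over each item in the set and add its parent directories."""
--     for path in list(path_entry_set):
--         # One forward scan: collapse runs of '/' while collecting every
--         # (nonempty) ancestor prefix of the normalized path, shallowest first.
--         out = []
--         ancestors = []
--         for ch in path:
--             if ch == '/':
--                 if out and out[-1] == '/':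
--                     continue  # part of a '//' run: drop it
--                 if out:
--                     ancestors.append(''.join(out))
--             out.append(ch)
--         path_entry_set.add(''.join(out))
--         for ancestor in reversed(ancestors):
--             if ancestor in path_entry_set:
--                 break
--             path_entry_set.add(ancestor)
--     return path_entry_set
-- ===== Notes on version B (the rewrite author's own statement) =====
-- stated objective: alternative
-- what changed: Per path, B replaces A's fixpoint '//'-replace loop plus repeated dirname/rsplit upward walk by one fused forward scan that simultaneously collapses runs of '/' and collects every nonempty ancestor prefix (shallowest first); the collected prefixes are then inserted deepest-first with the same stop-at-existing rule.
import Mathlib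
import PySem

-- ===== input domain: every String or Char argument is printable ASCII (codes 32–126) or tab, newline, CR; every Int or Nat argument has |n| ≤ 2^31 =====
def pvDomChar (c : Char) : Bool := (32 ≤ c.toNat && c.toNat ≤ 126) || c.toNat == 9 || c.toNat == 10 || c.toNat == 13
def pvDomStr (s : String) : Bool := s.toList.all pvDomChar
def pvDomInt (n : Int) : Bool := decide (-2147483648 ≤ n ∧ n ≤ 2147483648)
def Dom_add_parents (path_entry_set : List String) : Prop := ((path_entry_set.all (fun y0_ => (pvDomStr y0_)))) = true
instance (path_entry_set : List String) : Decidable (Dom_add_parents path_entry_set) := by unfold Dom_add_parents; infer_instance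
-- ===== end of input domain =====

-- B fuses, per path, A's fixpoint '//'-replace loop and repeated dirname/rsplit upward walk
-- into ONE forward scan that collapses '/'-runs and collects the ancestor prefixes (objective:
-- alternative; the return-value equality proved here also covers the in-place mutation, since
-- the returned list IS the mutated set).

-- ===== PORT A =====

-- termination facts for the "while '//' in path" loop and the dirname walk (cited by the ports)
theorem pvReplaceGoLe (fuel : Nat) : ∀ (l acc : List Char),
    (PySem.Chars.replace.go ['/','/'] ['/'] fuel l acc).length ≤ acc.length + l.length := by
  induction fuel with
  | zero => intro l acc; simp [PySem.Chars.replace.go]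
  | succ n ih =>
    intro l acc
    cases l with
    | nil => simp [PySem.Chars.replace.go]
    | cons c t =>
      by_cases h : List.isPrefixOf ['/','/'] (c :: t) = true
      · obtain ⟨r, hr⟩ := List.isPrefixOf_iff_prefix.mp h
        simp only [PySem.Chars.replace.go, h, if_pos]
        have h2 : List.drop ['/','/'].length (c :: t) = r := by
          rw [← hr]; simp
        rw [h2, show (['/'].reverse ++ acc : List Char) = '/' :: acc from rfl]
        have := ih r ('/' :: acc)
        have hlen : t.length = r.length + 1 := by
          have : c :: t = '/' :: '/' :: r := by rw [← hr]; rfl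
          cases this; simp
        simp only [List.length_cons] at this ⊢; omega
      · simp only [PySem.Chars.replace.go, h, if_neg, Bool.false_eq_true, not_false_iff]
        have := ih t (c :: acc)
        simp only [List.length_cons] at this ⊢; omega

theorem pvReplaceGoLt (fuel : Nat) : ∀ (l acc : List Char), l.length ≤ fuel →
    ['/','/'] <:+: l →
    (PySem.Chars.replace.go ['/','/'] ['/'] fuel l acc).length < acc.length + l.length := by
  induction fuel with
  | zero =>
    intro l acc hf hinf
    have : l = [] := List.length_eq_zero_iff.mp (by omega)
    subst this
    exact absurd (List.eq_nil_of_infix_nil hinf) (by simp)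
  | succ n ih =>
    intro l acc hf hinf
    cases l with
    | nil => exact absurd (List.eq_nil_of_infix_nil hinf) (by simp)
    | cons c t =>
      by_cases h : List.isPrefixOf ['/','/'] (c :: t) = true
      · obtain ⟨r, hr⟩ := List.isPrefixOf_iff_prefix.mp h
        simp only [PySem.Chars.replace.go, h, if_pos]
        have h2 : List.drop ['/','/'].length (c :: t) = r := by rw [← hr]; simp
        rw [h2, show (['/'].reverse ++ acc : List Char) = '/' :: acc from rfl]
        have := pvReplaceGoLe n r ('/' :: acc)
        have hlen : t.length = r.length + 1 := by
          have : c :: t = '/' :: '/' :: r := by rw [← hr]; rfl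
          cases this; simp
        simp only [List.length_cons] at this ⊢; omega
      · simp only [PySem.Chars.replace.go, h, if_neg, Bool.false_eq_true, not_false_iff]
        have hinf' : ['/','/'] <:+: t := by
          rcases List.infix_cons_iff.mp hinf with hp | hi
          · exact absurd (List.isPrefixOf_iff_prefix.mpr hp) h
          · exact hi
        have := ih t (c :: acc) (by simp only [List.length_cons] at hf ⊢; omega) hinf'
        simp only [List.length_cons] at this ⊢; omega

theorem pvReplaceLt (s : List Char) (h : PySem.Chars.isIn ['/','/'] s = true) :
    (PySem.Chars.replace s ['/','/'] ['/']).length < s.length := by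
  have hinf := (PySem.Chars.isIn_iff_infix _ _).mp h
  simpa using pvReplaceGoLt s.length s [] le_rfl hinf

-- while '//' in path: path = path.replace('//', '/')   (A's normalization loop)
def pvNorm (path : String) : String :=
  if PySem.Str.isIn "//" path then pvNorm (PySem.Str.replace path "//" "/") else path
termination_by path.toList.length
decreasing_by
  rename_i h
  rw [PySem.Str.toList_replace]
  exact pvReplaceLt path.toList (by rw [PySem.Str.isIn_eq] at h; exact h)

-- exact hand port of path.rsplit('/', 1)[0]: everything before the LAST '/',
-- or the whole string when there is no '/'
def pvRsplitHead (cs : List Char) : List Char :=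
  if '/' ∈ cs then ((cs.reverse.dropWhile (· ≠ '/')).tail).reverse else cs

theorem pvRsplitHead_lt (cs : List Char) (h : '/' ∈ cs) :
    (pvRsplitHead cs).length < cs.length := by
  unfold pvRsplitHead
  rw [if_pos h]
  have hne : cs.reverse.dropWhile (· ≠ '/') ≠ [] := by
    intro hnil
    have := List.dropWhile_eq_nil_iff.mp hnil '/' (by simpa using h)
    simp at this
  have h1 : (cs.reverse.dropWhile (· ≠ '/')).length ≤ cs.length := by
    simpa using List.length_dropWhile_le (· ≠ '/') cs.reverse
  have h2 : 0 < (cs.reverse.dropWhile (· ≠ '/')).length := List.length_pos_iff.mpr hne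
  rw [List.length_reverse, List.length_tail]
  omega

def pvDirname (path : String) : String :=
  let p := pvNorm path
  let d := String.ofList (pvRsplitHead p.toList)
  if d = p then "" else d

theorem pvNorm_len_le (path : String) : (pvNorm path).toList.length ≤ path.toList.length := by
  fun_induction pvNorm with
  | case1 p h ih =>
    have hlt : (PySem.Str.replace p "//" "/").toList.length < p.toList.length := by
      rw [PySem.Str.toList_replace]
      exact pvReplaceLt p.toList (by rw [PySem.Str.isIn_eq] at h; exact h)
    omega
  | case2 p h => exact le_rfl

theorem pvDirname_lt (parent : String) (h : parent ≠ "") :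
    (pvDirname parent).toList.length < parent.toList.length := by
  have hpos : 0 < parent.toList.length := by
    rcases Nat.eq_zero_or_pos parent.toList.length with h0 | h0
    · exfalso
      apply h
      have : parent.toList = [] := List.length_eq_zero_iff.mp h0
      have := congrArg String.ofList this
      simpa using this
    · exact h0
  unfold pvDirname
  by_cases hd : String.ofList (pvRsplitHead (pvNorm parent).toList) = pvNorm parent
  · simpa [hd] using hpos
  · rw [if_neg hd]
    by_cases hs : '/' ∈ (pvNorm parent).toList
    · have := pvRsplitHead_lt (pvNorm parent).toList hs
      have := pvNorm_len_le parent
      simp only [String.toList_ofList]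
      omega
    · exfalso
      apply hd
      unfold pvRsplitHead
      rw [if_neg hs]
      simp

-- parent_dir = dirname(path); while parent_dir and parent_dir not in s: s.add(parent_dir); parent_dir = dirname(parent_dir)
def pvWalkA (s : PySem.Set String) (parent : String) : PySem.Set String :=
  if parent ≠ "" ∧ PySem.Set.contains s parent = false then
    pvWalkA (PySem.Set.add s parent) (pvDirname parent)
  else s
termination_by parent.toList.length
decreasing_by exact pvDirname_lt parent (by tauto)

-- the body of A's "for path in list(path_entry_set)" loop
def pvStepA (s : PySem.Set String) (path0 : String) : PySem.Set String :=
  let path := pvNorm path0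
  let s1 := if PySem.Set.contains s path = false then PySem.Set.add s path else s
  if PySem.Str.isIn "/" path then pvWalkA s1 (pvDirname path) else s1

def add_parents (path_entry_set : List String) : List String :=
  path_entry_set.foldl pvStepA path_entry_set

-- ===== PORT B =====

-- the fused forward scan over the path's characters: collapse runs of '/' into out,
-- record the current out as an ancestor prefix at each kept '/' (shallowest first)
def pvScan : List Char → List Char → List String → List Char × List String
  | [], out, anc => (out, anc)
  | c :: rest, out, anc =>
    if c = '/' then
      if out ≠ [] ∧ out.getLast? = some '/' then
        pvScan rest out anc                                  -- continue: drop this '/'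
      else
        pvScan rest (out ++ [c])
          (if out ≠ [] then anc ++ [String.ofList out] else anc)
    else
      pvScan rest (out ++ [c]) anc

-- for ancestor in reversed(ancestors): if ancestor in s: break; s.add(ancestor)
def pvAddAnc (s : PySem.Set String) : List String → PySem.Set String
  | [] => s
  | a :: rest => if PySem.Set.contains s a = true then s else pvAddAnc (PySem.Set.add s a) rest

-- the body of B's "for path in list(path_entry_set)" loop
def pvStepB (s : PySem.Set String) (path0 : String) : PySem.Set String :=
  let r := pvScan path0.toList [] []
  let s1 := PySem.Set.add s (String.ofList r.1)
  pvAddAnc s1 r.2.reverse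

def add_parents_alt (path_entry_set : List String) : List String :=
  path_entry_set.foldl pvStepB path_entry_set

-- ===== PRECONDITION & SPEC =====
def Spec_add_parents (path_entry_set : List String) (out : List String) : Prop := out = add_parents_alt path_entry_set
instance (path_entry_set : List String) (out : List String) : Decidable (Spec_add_parents path_entry_set out) := by unfold Spec_add_parents; infer_instance

-- ===== CLAIM (what is proved, stated in full; the proofs are below) =====
def Claim_equal_add_parents : Prop := ∀ (path_entry_set : List String), Dom_add_parents path_entry_set → Spec_add_parents path_entry_set (add_parents path_entry_set)

-- ===== LEMMAS AND PROOFS =====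

-- pure spec of the collapsing scan: dAfter prev cs drops each '/' that follows a kept '/'
def pvDAfter : Option Char → List Char → List Char
  | _, [] => []
  | prev, c :: r => if c = '/' ∧ prev = some '/' then pvDAfter prev r else c :: pvDAfter (some c) r

-- pure spec of the recorded ancestors: out is the already-collapsed prefix
def pvAncD : List Char → List Char → List String
  | _, [] => []
  | out, c :: r =>
      (if c = '/' ∧ out ≠ [] then [String.ofList out] else []) ++ pvAncD (out ++ [c]) r

-- one full left-to-right pass of str.replace('//','/')
def pvRepDS : List Char → List Char
  | [] => []
  | '/' :: '/' :: r => '/' :: pvRepDS r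
  | c :: r => c :: pvRepDS r

-- equation lemmas for pvRepDS (its middle pattern overlaps the catch-all)
theorem pvRepDS_dd (r : List Char) : pvRepDS ('/' :: '/' :: r) = '/' :: pvRepDS r := rfl

theorem pvRepDS_cons (c : Char) (r : List Char) (h : ∀ r', c :: r ≠ '/' :: '/' :: r') :
    pvRepDS (c :: r) = c :: pvRepDS r := by
  unfold pvRepDS
  split
  · rename_i heq
    exact absurd heq (List.cons_ne_nil c r)
  · rename_i r' heq
    exact absurd heq (h r')
  · rename_i c' r' _ heq
    injection heq with h1 h2
    subst h1; subst h2
    conv_lhs => rw [pvRepDS.eq_def]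

theorem pvRepDS_single (c : Char) : pvRepDS [c] = [c] :=
  pvRepDS_cons c [] (by intro r' h; injection h with _ h; exact (List.cons_ne_nil _ _) h.symm)

-- unfolding equations (zeta-reduced; each is rfl or a single rw)
theorem pvNorm_def (path : String) : pvNorm path =
    (if PySem.Str.isIn "//" path then pvNorm (PySem.Str.replace path "//" "/") else path) := by
  rw [pvNorm]

theorem pvDirname_def (path : String) : pvDirname path =
    (if String.ofList (pvRsplitHead (pvNorm path).toList) = pvNorm path then ""
     else String.ofList (pvRsplitHead (pvNorm path).toList)) := rfl

theorem pvWalkA_def (s : PySem.Set String) (parent : String) : pvWalkA s parent =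
    (if parent ≠ "" ∧ PySem.Set.contains s parent = false then
      pvWalkA (PySem.Set.add s parent) (pvDirname parent) else s) := by
  rw [pvWalkA]

theorem pvStepA_def (s : PySem.Set String) (p : String) : pvStepA s p =
    (if PySem.Str.isIn "/" (pvNorm p) then
      pvWalkA (if PySem.Set.contains s (pvNorm p) = false then PySem.Set.add s (pvNorm p) else s) (pvDirname (pvNorm p))
     else (if PySem.Set.contains s (pvNorm p) = false then PySem.Set.add s (pvNorm p) else s)) := rfl

theorem pvStepB_def (s : PySem.Set String) (p : String) : pvStepB s p =
    pvAddAnc (PySem.Set.add s (String.ofList (pvScan p.toList [] []).1)) (pvScan p.toList [] []).2.reverse := rfl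

-- the scan equals its pure specification
theorem pvScan_spec : ∀ (cs out : List Char) (anc : List String),
    pvScan cs out anc =
      (out ++ pvDAfter out.getLast? cs, anc ++ pvAncD out (pvDAfter out.getLast? cs)) := by
  intro cs
  induction cs with
  | nil => intro out anc; simp [pvScan, pvDAfter, pvAncD]
  | cons c r ih =>
    intro out anc
    by_cases hc : c = '/'
    · subst hc
      by_cases hk : out ≠ [] ∧ out.getLast? = some '/'
      · rw [show pvScan ('/' :: r) out anc = pvScan r out anc by simp [pvScan, hk],
            show pvDAfter out.getLast? ('/' :: r) = pvDAfter out.getLast? r by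
              simp [pvDAfter, hk.2]]
        exact ih out anc
      · have hp : out.getLast? ≠ some '/' := by
          by_cases ho : out = []
          · subst ho; simp
          · intro hl; exact hk ⟨ho, hl⟩
        rw [show pvScan ('/' :: r) out anc =
              pvScan r (out ++ ['/']) (if out ≠ [] then anc ++ [String.ofList out] else anc) by
            simp [pvScan, hk],
            show pvDAfter out.getLast? ('/' :: r) = '/' :: pvDAfter (some '/') r by
              simp [pvDAfter, hp]]
        rw [ih (out ++ ['/'])]
        have hl : (out ++ ['/']).getLast? = some '/' := by simp
        rw [hl]
        refine Prod.ext ?_ ?_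
        · simp
        · show _ = anc ++ pvAncD out ('/' :: pvDAfter (some '/') r)
          simp only [pvAncD]
          by_cases ho : out = []
          · subst ho; simp
          · simp [ho, List.append_assoc]
    · rw [show pvScan (c :: r) out anc = pvScan r (out ++ [c]) anc by simp [pvScan, hc],
          show pvDAfter out.getLast? (c :: r) = c :: pvDAfter (some c) r by
            simp [pvDAfter, hc]]
      rw [ih (out ++ [c])]
      have hl : (out ++ [c]).getLast? = some c := by simp
      rw [hl]
      refine Prod.ext ?_ ?_
      · simp
      · show _ = anc ++ pvAncD out (c :: pvDAfter (some c) r)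
        simp [pvAncD, hc]

-- replace.go computes pvRepDS
theorem pvReplaceGo_eq (fuel : Nat) : ∀ (l : List Char), l.length ≤ fuel → ∀ acc,
    PySem.Chars.replace.go ['/','/'] ['/'] fuel l acc = acc.reverse ++ pvRepDS l := by
  induction fuel with
  | zero =>
    intro l hl acc
    have : l = [] := List.length_eq_zero_iff.mp (by omega)
    subst this
    simp [PySem.Chars.replace.go, pvRepDS]
  | succ n ih =>
    intro l hl acc
    cases l with
    | nil => simp [PySem.Chars.replace.go, pvRepDS]
    | cons c t =>
      by_cases h : List.isPrefixOf ['/','/'] (c :: t) = true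
      · obtain ⟨r, hr⟩ := List.isPrefixOf_iff_prefix.mp h
        have hct : c :: t = '/' :: '/' :: r := by rw [← hr]; rfl
        cases hct
        simp only [PySem.Chars.replace.go, h, if_pos]
        rw [show (List.drop ['/','/'].length ('/' :: '/' :: r) : List Char) = r from rfl,
            show (['/'].reverse ++ acc : List Char) = '/' :: acc from rfl]
        rw [ih r (by simp at hl; omega) ('/' :: acc)]
        simp [pvRepDS]
      · simp only [PySem.Chars.replace.go, h, if_neg, Bool.false_eq_true, not_false_iff]
        rw [ih t (by simp at hl; omega) (c :: acc)]
        have hshape : pvRepDS (c :: t) = c :: pvRepDS t := by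
          refine pvRepDS_cons c t ?_
          rintro r' heq
          rw [heq] at h
          simp [List.isPrefixOf] at h
        rw [hshape]
        simp
    
theorem pvReplace_eq (cs : List Char) :
    PySem.Chars.replace cs ['/','/'] ['/'] = pvRepDS cs := by
  rw [show PySem.Chars.replace cs ['/','/'] ['/'] =
        PySem.Chars.replace.go ['/','/'] ['/'] cs.length cs [] by
      simp [PySem.Chars.replace]]
  simpa using pvReplaceGo_eq cs.length cs le_rfl []

-- collapsing is invariant under one replace pass
theorem pvDAfter_repDS_go : ∀ (n : Nat) (cs : List Char), cs.length ≤ n → ∀ prev,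
    pvDAfter prev (pvRepDS cs) = pvDAfter prev cs := by
  intro n
  induction n with
  | zero =>
    intro cs h prev
    have : cs = [] := List.length_eq_zero_iff.mp (by omega)
    subst this; rfl
  | succ n ih =>
    intro cs h prev
    match cs with
    | [] => rfl
    | [c] =>
      rw [pvRepDS_single]
    | c :: d :: t =>
      by_cases hdd : c = '/' ∧ d = '/'
      · rcases hdd with ⟨rfl, rfl⟩
        rw [pvRepDS_dd]
        by_cases hp : prev = some '/'
        · rw [show pvDAfter prev ('/' :: pvRepDS t) = pvDAfter prev (pvRepDS t) by
                simp [pvDAfter, hp],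
              show pvDAfter prev ('/' :: '/' :: t) = pvDAfter prev ('/' :: t) by
                simp [pvDAfter, hp],
              show pvDAfter prev ('/' :: t) = pvDAfter prev t by simp [pvDAfter, hp]]
          exact ih t (by simp at h; omega) prev
        · rw [show pvDAfter prev ('/' :: pvRepDS t) = '/' :: pvDAfter (some '/') (pvRepDS t) by
                simp [pvDAfter, hp],
              show pvDAfter prev ('/' :: '/' :: t) = '/' :: pvDAfter (some '/') ('/' :: t) by
                simp [pvDAfter, hp],
              show pvDAfter (some '/') ('/' :: t) = pvDAfter (some '/') t by simp [pvDAfter]]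
          rw [ih t (by simp at h; omega) (some '/')]
      · rw [pvRepDS_cons c (d :: t) (by rintro r' heq; injection heq with h1 h2; injection h2 with h2 _; exact hdd ⟨h1, h2⟩)]
        by_cases hc : c = '/' ∧ prev = some '/'
        · rw [show pvDAfter prev (c :: pvRepDS (d :: t)) = pvDAfter prev (pvRepDS (d :: t)) by
                simp [pvDAfter, hc],
              show pvDAfter prev (c :: d :: t) = pvDAfter prev (d :: t) by simp [pvDAfter, hc]]
          exact ih (d :: t) (by simp at h ⊢; omega) prev
        · rw [show pvDAfter prev (c :: pvRepDS (d :: t)) = c :: pvDAfter (some c) (pvRepDS (d :: t)) by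
                simp [pvDAfter, hc],
              show pvDAfter prev (c :: d :: t) = c :: pvDAfter (some c) (d :: t) by
                simp [pvDAfter, hc]]
          rw [ih (d :: t) (by simp at h ⊢; omega) (some c)]

theorem pvDAfter_repDS (cs : List Char) (prev : Option Char) :
    pvDAfter prev (pvRepDS cs) = pvDAfter prev cs :=
  pvDAfter_repDS_go cs.length cs le_rfl prev

-- no '//' infix: collapsing after prev = some c is the identity
theorem pvDAfter_id : ∀ (r : List Char) (c : Char), ¬ ['/','/'] <:+: (c :: r) →
    pvDAfter (some c) r = r := by
  intro r
  induction r with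
  | nil => intro c _; rfl
  | cons d t ih =>
    intro c hno
    have hnd : ¬ (d = '/' ∧ c = '/') := by
      rintro ⟨rfl, rfl⟩
      exact hno ⟨[], t, by simp⟩
    rw [show pvDAfter (some c) (d :: t) = d :: pvDAfter (some d) t by
          simp only [pvDAfter]
          rw [if_neg (by rintro ⟨h1, h2⟩; injection h2 with h2; exact hnd ⟨h1, h2⟩)]]
    rw [ih d (fun hi => hno (hi.trans (List.suffix_cons c (d :: t)).isInfix))]

theorem pvDAfter_none_id (cs : List Char) (hno : ¬ ['/','/'] <:+: cs) :
    pvDAfter none cs = cs := by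
  cases cs with
  | nil => rfl
  | cons c r =>
    rw [show pvDAfter none (c :: r) = c :: pvDAfter (some c) r by simp [pvDAfter]]
    rw [pvDAfter_id r c hno]

-- A's normalization loop computes the one-pass collapse
theorem pvNorm_eq_dAfter (p : String) : (pvNorm p).toList = pvDAfter none p.toList := by
  fun_induction pvNorm with
  | case1 q h ih =>
    rw [ih, PySem.Str.toList_replace]
    rw [show ("//" : String).toList = ['/','/'] from rfl, show ("/" : String).toList = ['/'] from rfl]
    rw [pvReplace_eq, pvDAfter_repDS]
  | case2 q h =>
    rw [pvDAfter_none_id]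
    intro hinf
    rw [PySem.Str.isIn_eq] at h
    rw [show ("//" : String).toList = ['/','/'] from rfl] at h
    exact absurd ((PySem.Chars.isIn_iff_infix _ _).mpr (by simpa using hinf)) (by simp [h])

-- snoc equation for the recorded ancestors
theorem pvAncD_snoc : ∀ (ds out : List Char) (c : Char),
    pvAncD out (ds ++ [c]) =
      pvAncD out ds ++ (if c = '/' ∧ out ++ ds ≠ [] then [String.ofList (out ++ ds)] else []) := by
  intro ds
  induction ds with
  | nil => intro out c; simp [pvAncD]
  | cons d t ih =>
    intro out c
    rw [show ((d :: t) ++ [c] : List Char) = d :: (t ++ [c]) from rfl]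
    simp only [pvAncD]
    rw [ih (out ++ [d]) c]
    simp [List.append_assoc]

-- dirname facts on explicit snoc lists (q is already normalized)
theorem pvNorm_eq_self (s : String) (h : PySem.Str.isIn "//" s = false) : pvNorm s = s := by
  rw [pvNorm_def, if_neg (by rw [h]; simp)]

theorem pvNorm_no_dslash (p : String) : PySem.Str.isIn "//" (pvNorm p) = false := by
  fun_induction pvNorm with
  | case1 q h ih => exact ih
  | case2 q h => simpa using h

theorem pvNoDslash_isIn (q : List Char) (hno : ¬ ['/','/'] <:+: q) :
    PySem.Str.isIn "//" (String.ofList q) = false := by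
  rw [PySem.Str.isIn_eq]
  refine (PySem.Chars.isIn_eq_false_iff _ _).mpr ?_
  intro hinf
  simp only [String.toList_ofList] at hinf
  exact hno hinf

theorem pvDirname_of_no_slash (q : List Char) (hno : ¬ ['/','/'] <:+: q)
    (h : '/' ∉ q) : pvDirname (String.ofList q) = "" := by
  rw [pvDirname_def]
  rw [pvNorm_eq_self _ (pvNoDslash_isIn q hno)]
  rw [String.toList_ofList]
  unfold pvRsplitHead
  rw [if_neg h, if_pos rfl]

theorem pvDirname_snoc_slash (xs : List Char) (hno : ¬ ['/','/'] <:+: (xs ++ ['/'])) :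
    pvDirname (String.ofList (xs ++ ['/'])) = String.ofList xs := by
  rw [pvDirname_def]
  rw [pvNorm_eq_self _ (pvNoDslash_isIn _ hno)]
  rw [String.toList_ofList]
  have hhead : pvRsplitHead (xs ++ ['/']) = xs := by
    unfold pvRsplitHead
    rw [if_pos (by simp)]
    rw [List.reverse_append]
    simp only [List.reverse_singleton, List.singleton_append]
    rw [List.dropWhile_cons_of_neg (by simp)]
    simp
  rw [hhead]
  rw [if_neg ?_]
  intro heq
  have := congrArg (fun t => t.toList.length) heq
  simp at this

theorem pvDirname_snoc_other (xs : List Char) (c : Char) (hc : ¬ c = '/')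
    (hno : ¬ ['/','/'] <:+: (xs ++ [c])) :
    pvDirname (String.ofList (xs ++ [c])) = pvDirname (String.ofList xs) := by
  have hnoxs : ¬ ['/','/'] <:+: xs := fun hi => hno (hi.trans (List.prefix_append xs [c]).isInfix)
  by_cases hs : '/' ∈ xs
  · rw [pvDirname_def, pvDirname_def]
    rw [pvNorm_eq_self _ (pvNoDslash_isIn _ hno), pvNorm_eq_self _ (pvNoDslash_isIn _ hnoxs)]
    rw [String.toList_ofList, String.toList_ofList]
    have hhead : pvRsplitHead (xs ++ [c]) = pvRsplitHead xs := by
      unfold pvRsplitHead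
      rw [if_pos (by simp [hs]), if_pos hs]
      rw [List.reverse_append]
      simp only [List.reverse_singleton, List.singleton_append]
      rw [List.dropWhile_cons_of_pos (by simpa using hc)]
    rw [hhead]
    have hlt := pvRsplitHead_lt xs hs
    rw [if_neg ?_, if_neg ?_]
    · intro heq
      have := congrArg (fun t => t.toList.length) heq
      simp at this; omega
    · intro heq
      have := congrArg (fun t => t.toList.length) heq
      simp only [String.toList_ofList, List.length_append, List.length_cons,
        List.length_nil] at this
      have hlen : xs.length < (xs ++ [c]).length := by simp
      simp at hlen
      omega
  · have hs1 : '/' ∉ xs ++ [c] := by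
      simp only [List.mem_append, List.mem_singleton]
      rintro (h1 | h2)
      · exact hs h1
      · exact hc h2.symm
    rw [pvDirname_of_no_slash (xs ++ [c]) hno hs1, pvDirname_of_no_slash xs hnoxs hs]

-- nonempty list gives nonempty string
theorem pvOfList_ne_empty (xs : List Char) (h : xs ≠ []) : String.ofList xs ≠ "" := by
  intro heq
  have := congrArg (fun t => t.toList.length) heq
  simp at this
  exact h this

-- core: the deepest-first insertion of the collected prefixes IS A's dirname walk
theorem pvAddAnc_eq_walk (ds : List Char) (hno : ¬ ['/','/'] <:+: ds) :
    ∀ s : PySem.Set String,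
      pvAddAnc s (pvAncD [] ds).reverse = pvWalkA s (pvDirname (String.ofList ds)) := by
  induction ds using List.reverseRecOn with
  | nil =>
    intro s
    rw [show pvAncD ([] : List Char) [] = [] from rfl]
    rw [pvDirname_of_no_slash [] (by simp) (by simp)]
    rw [pvWalkA_def, if_neg (by simp)]
    rfl
  | append_singleton xs c ih =>
    intro s
    have hnoxs : ¬ ['/','/'] <:+: xs := fun hi => hno (hi.trans (List.prefix_append xs [c]).isInfix)
    rw [pvAncD_snoc xs [] c]
    simp only [List.nil_append]
    by_cases hc : c = '/'
    · subst hc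
      rw [pvDirname_snoc_slash xs hno]
      by_cases hxs : xs = []
      · subst hxs
        rw [if_neg (by simp)]
        rw [pvWalkA_def, if_neg (by simp)]
        rfl
      · rw [if_pos ⟨rfl, by simpa using hxs⟩]
        rw [List.reverse_append]
        rw [show ([String.ofList xs].reverse ++ (pvAncD [] xs).reverse : List String)
              = String.ofList xs :: (pvAncD [] xs).reverse by simp]
        rw [pvWalkA_def]
        by_cases hm : PySem.Set.contains s (String.ofList xs) = true
        · rw [show pvAddAnc s (String.ofList xs :: (pvAncD [] xs).reverse)
                = if PySem.Set.contains s (String.ofList xs) = true then s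
                  else pvAddAnc (PySem.Set.add s (String.ofList xs)) (pvAncD [] xs).reverse
                from rfl, if_pos hm]
          rw [if_neg (by rw [hm]; simp)]
        · have hmf := eq_false_of_ne_true hm
          rw [show pvAddAnc s (String.ofList xs :: (pvAncD [] xs).reverse)
                = if PySem.Set.contains s (String.ofList xs) = true then s
                  else pvAddAnc (PySem.Set.add s (String.ofList xs)) (pvAncD [] xs).reverse
                from rfl, if_neg (by rw [hmf]; simp)]
          rw [if_pos ⟨pvOfList_ne_empty xs hxs, hmf⟩]
          exact ih hnoxs (PySem.Set.add s (String.ofList xs))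
    · rw [if_neg (by rintro ⟨h1, _⟩; exact hc h1)]
      rw [pvDirname_snoc_other xs c hc hno]
      simpa using ih hnoxs s

-- A's conditional insert is exactly Set.add
theorem pvAdd_eq (s : PySem.Set String) (x : String) :
    (if PySem.Set.contains s x = false then PySem.Set.add s x else s) = PySem.Set.add s x := by
  by_cases hc : PySem.Set.contains s x = true
  · rw [if_neg (by rw [hc]; simp), PySem.Set.add, if_pos hc]
  · rw [if_pos (eq_false_of_ne_true hc)]

-- the two loop bodies agree
theorem pvStep_eq (s : PySem.Set String) (p : String) : pvStepA s p = pvStepB s p := by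
  have hscan := pvScan_spec p.toList [] []
  rw [show ([] : List Char).getLast? = none from rfl] at hscan
  have hN : pvDAfter none p.toList = (pvNorm p).toList := (pvNorm_eq_dAfter p).symm
  rw [hN] at hscan
  have hno : ¬ ['/','/'] <:+: (pvNorm p).toList := by
    have h := pvNorm_no_dslash p
    rw [PySem.Str.isIn_eq] at h
    exact (PySem.Chars.isIn_eq_false_iff _ _).mp h
  rw [pvStepA_def, pvStepB_def, pvAdd_eq, hscan]
  simp only [List.nil_append]
  rw [String.ofList_toList]
  rw [pvAddAnc_eq_walk (pvNorm p).toList hno]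
  rw [String.ofList_toList]
  by_cases hs : PySem.Str.isIn "/" (pvNorm p) = true
  · rw [if_pos hs]
  · rw [if_neg hs]
    have hmem : '/' ∉ (pvNorm p).toList := by
      rw [PySem.Str.isIn_eq] at hs
      have h2 := (PySem.Chars.isIn_eq_false_iff ("/".toList) ((pvNorm p).toList)).mp
        (by simpa using hs)
      intro hm
      exact h2 ((List.singleton_infix_iff '/' (pvNorm p).toList).mpr hm)
    have hd : pvDirname (pvNorm p) = "" := by
      have h3 := pvDirname_of_no_slash (pvNorm p).toList hno hmem
      rwa [String.ofList_toList] at h3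
    rw [hd, pvWalkA_def, if_neg (by simp)]

-- ===== VERDICT (by name: the statement is the Claim_ definition above) =====
theorem add_parents_spec : Claim_equal_add_parents := by
  intro l _
  unfold Spec_add_parents add_parents add_parents_alt
  rw [show pvStepA = pvStepB from funext fun s => funext fun p => pvStep_eq s p]
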